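-- pv_equiv track=rewrite | github.com/BeataBerlinaHalawa/kriptography | prak4/substitusi cipher/latihan1.py | hitung_permutasi_kelompok
-- ===== SOURCE A (Python) =====
-- import math
-- from collections import Counter
--
-- def faktorial(n):
--     """Menghitung faktorial, menggunakan math.factorial."""
--     if n < 0:
--         return 0
--     return math.factorial(n)
--
-- def hitung_permutasi_kelompok(data):
--     """Menghitung jumlah permutasi unsur yang sama P = n! / (k1! * k2! * ...)"""
--     n = len(data)
--
--     # Menghitung frekuensi (jumlah kemunculan) setiap unsur
--     frekuensi = Counter(data)
--
--     pembilang = faktorial(n)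
--
--     # Menghitung penyebut: k1! * k2! * ...
--     penyebut = 1
--     for count in frekuensi.values():
--         penyebut *= faktorial(count)
--
--     return pembilang // penyebut
-- ===== SOURCE B (Python) =====
-- import math
-- from collections import Counter
--
-- def hitung_permutasi_kelompok(data):
--     """Multinomial via a product of binomial coefficients over a shrinking pool."""
--     result = 1
--     remaining = len(data)
--     for count in Counter(data).values():
--         result *= math.comb(remaining, count)
--         remaining -= count
--     return result
-- ===== Notes on version B (the rewrite author's own statement) =====
-- stated objective: alternative
-- what changed: Instead of forming n! and dividing by the product of group factorials, B keeps a shrinking pool 'remaining' and multiplies binomial coefficients math.comb(remaining, count), never building n!.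
import Mathlib
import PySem

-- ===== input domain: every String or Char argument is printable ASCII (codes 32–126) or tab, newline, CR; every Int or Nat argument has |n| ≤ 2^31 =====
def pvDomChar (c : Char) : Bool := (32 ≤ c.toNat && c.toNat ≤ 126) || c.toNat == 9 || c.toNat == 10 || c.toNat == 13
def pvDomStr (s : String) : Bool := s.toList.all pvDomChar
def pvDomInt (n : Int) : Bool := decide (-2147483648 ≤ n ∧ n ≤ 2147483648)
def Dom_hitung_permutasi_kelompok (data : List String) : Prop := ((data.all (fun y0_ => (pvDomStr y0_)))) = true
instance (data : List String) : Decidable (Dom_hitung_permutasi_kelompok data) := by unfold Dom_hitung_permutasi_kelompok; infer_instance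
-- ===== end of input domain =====

-- B computes the multinomial as a product of binomial coefficients over a shrinking pool
-- instead of A's n! divided by the product of group factorials (objective: alternative).

-- ===== PORT A =====
def faktorial (n : Int) : Int :=
  if n < 0 then 0 else (Nat.factorial n.toNat : Int)

def hitung_permutasi_kelompok (data : List String) : Int :=
  let n : Int := (data.length : Int)
  let frekuensi := PySem.Dict.counter data
  let pembilang := faktorial n
  let penyebut := frekuensi.values.foldl (fun acc count => acc * faktorial count) 1
  PySem.Int.floordiv pembilang penyebut

-- ===== PORT B =====
-- math.comb is ported as Nat.choose via .toNat: exact here since the loop only ever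
-- feeds it the nonnegative 'remaining' pool and nonnegative Counter values.
def hitung_permutasi_kelompok_alt (data : List String) : Int :=
  let st := (PySem.Dict.counter data).values.foldl
    (fun (st : Int × Int) count =>
      (st.1 * (Nat.choose st.2.toNat count.toNat : Int), st.2 - count))
    (1, (data.length : Int))
  st.1

-- ===== PRECONDITION & SPEC =====
def Spec_hitung_permutasi_kelompok (data : List String) (out : Int) : Prop := out = hitung_permutasi_kelompok_alt data
instance (data : List String) (out : Int) : Decidable (Spec_hitung_permutasi_kelompok data out) := by unfold Spec_hitung_permutasi_kelompok; infer_instance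

-- ===== CLAIM (what is proved, stated in full; the proofs are below) =====
def Claim_equal_hitung_permutasi_kelompok : Prop := ∀ (data : List String), Dom_hitung_permutasi_kelompok data → Spec_hitung_permutasi_kelompok data (hitung_permutasi_kelompok data)

-- ===== LEMMAS AND PROOFS =====

/-- The product of binomial coefficients B's loop accumulates, as a Nat recursion. -/
def chooseProd : List Nat → Nat → Nat
  | [], _ => 1
  | k :: ks, r => Nat.choose r k * chooseProd ks (r - k)

/-- Telescoping multinomial identity: r! = (∏ k!) * (∏ C(remaining, k)). -/
theorem factorial_eq_prod_mul_chooseProd :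
    ∀ (ks : List Nat) (r : Nat), ks.sum = r →
      Nat.factorial r = (ks.map Nat.factorial).prod * chooseProd ks r := by
  intro ks
  induction ks with
  | nil => intro r h; simp [chooseProd, ← h]
  | cons k ks ih =>
    intro r h
    simp only [List.sum_cons] at h
    have hk : k ≤ r := by omega
    have ih' := ih (r - k) (by omega)
    calc Nat.factorial r = Nat.choose r k * Nat.factorial k * Nat.factorial (r - k) :=
          (Nat.choose_mul_factorial_mul_factorial hk).symm
      _ = Nat.choose r k * Nat.factorial k *
            ((ks.map Nat.factorial).prod * chooseProd ks (r - k)) := by rw [ih']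
      _ = ((k :: ks).map Nat.factorial).prod * chooseProd (k :: ks) r := by
          simp [chooseProd]; ring

/-- A's denominator loop over the casted counts is the product of factorials. -/
theorem foldA_eq (ks : List Nat) (acc : Int) :
    (ks.map (fun (c : Nat) => (c : Int))).foldl (fun acc count => acc * faktorial count) acc
      = acc * ((ks.map Nat.factorial).prod : Int) := by
  induction ks generalizing acc with
  | nil => simp
  | cons k ks ih =>
    simp only [List.map_cons, List.foldl_cons, List.prod_cons, ih]
    have : faktorial (k : Int) = (Nat.factorial k : Int) := by
      simp [faktorial]
    rw [this]; push_cast; ring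

/-- B's loop over the casted counts computes the binomial product and the leftover pool. -/
theorem foldB_eq (ks : List Nat) (acc : Int) (r : Nat) (h : ks.sum ≤ r) :
    (ks.map (fun (c : Nat) => (c : Int))).foldl
      (fun (st : Int × Int) count =>
        (st.1 * (Nat.choose st.2.toNat count.toNat : Int), st.2 - count))
      (acc, (r : Int))
    = (acc * (chooseProd ks r : Int), ((r - ks.sum : Nat) : Int)) := by
  induction ks generalizing acc r with
  | nil => simp [chooseProd]
  | cons k ks ih =>
    simp only [List.sum_cons] at h
    have hk : k ≤ r := by omega
    simp only [List.map_cons, List.foldl_cons]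
    have h2 : (r : Int) - (k : Int) = ((r - k : Nat) : Int) := by omega
    rw [show ((((r : Int)).toNat)) = r from by omega,
        show (((k : Int)).toNat) = k from by omega, h2,
        ih (acc * (Nat.choose r k : Int)) (r - k) (by omega)]
    simp only [Prod.mk.injEq, chooseProd, List.sum_cons]
    exact ⟨by push_cast; ring, by congr 1; omega⟩

/-- Sum of a +1-at-y bump over a list. -/
theorem sum_map_add_ite (d : List String) (c : String → Nat) (y : String) :
    (d.map (fun x => c x + if y = x then 1 else 0)).sum
      = (d.map c).sum + d.count y := by
  induction d with
  | nil => simp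
  | cons a d ih =>
    simp only [List.map_cons, List.sum_cons, List.count_cons, ih]
    by_cases h : y = a
    · subst h; simp; omega
    · simp [h, Ne.symm h]; omega

/-- Over a nodup list containing every element of xs, the counts sum to xs.length. -/
theorem sum_counts_eq_length :
    ∀ (xs d : List String), d.Nodup → (∀ x ∈ xs, x ∈ d) →
      (d.map xs.count).sum = xs.length := by
  intro xs
  induction xs with
  | nil => intro d _ _; simp
  | cons y ys ih =>
    intro d hnd hmem
    have hcy : d.count y = 1 :=
      List.count_eq_one_of_mem hnd (hmem y (by simp))
    have hf : ∀ x ∈ d, (y :: ys).count x = ys.count x + if y = x then 1 else 0 := by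
      intro x _
      by_cases h : y = x <;> simp [h]
    rw [List.map_congr_left hf, sum_map_add_ite d ys.count y,
      ih d hnd (fun x hx => hmem x (by simp [hx])), hcy]
    simp

theorem hitung_permutasi_kelompok_eq (data : List String) :
    hitung_permutasi_kelompok data = hitung_permutasi_kelompok_alt data := by
  unfold hitung_permutasi_kelompok hitung_permutasi_kelompok_alt
  set ks : List Nat := (PySem.Set.ofList data).map (fun k => data.count k) with hks
  have hvals : (PySem.Dict.counter data).values = ks.map (fun (c : Nat) => (c : Int)) := by
    simp [PySem.Dict.values, PySem.Dict.items_counter, hks, List.map_map,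
      Function.comp]
  have hsum : ks.sum = data.length := by
    exact sum_counts_eq_length data _ (PySem.Set.nodup_ofList data)
      (fun x hx => (PySem.Set.mem_ofList data x).mpr hx)
  dsimp only
  rw [hvals, foldA_eq, foldB_eq ks 1 data.length (by omega)]
  simp only [one_mul]
  have hfact := factorial_eq_prod_mul_chooseProd ks data.length hsum
  have hfak : faktorial ((data.length : Int)) = (Nat.factorial data.length : Int) := by
    simp [faktorial]
  rw [hfak, hfact]
  have hpos : 0 < ((ks.map Nat.factorial).prod : Int) := by
    exact_mod_cast List.prod_pos (by
      intro x hx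
      simp only [List.mem_map] at hx
      obtain ⟨k, _, rfl⟩ := hx
      exact Nat.factorial_pos k)
  rw [Nat.cast_mul, PySem.Int.floordiv_eq_ediv_of_pos hpos]
  exact Int.mul_ediv_cancel_left _ (by omega)

-- ===== VERDICT (by name: the statement is the Claim_ definition above) =====
theorem hitung_permutasi_kelompok_spec : Claim_equal_hitung_permutasi_kelompok := by
  intro data _
  exact hitung_permutasi_kelompok_eq data
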